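-- pv_equiv track=rewrite | github.com/Shloub/metalang | out/euler23.py | sumdivaux
-- ===== SOURCE A (Python) =====
-- def sumdivaux2(t, n, i):
--     while i < n and t[i] == 0:
--         i += 1
--     return i
--
-- def sumdivaux(t, n, i):
--     if i > n:
--         return 1
--     elif t[i] == 0:
--         return sumdivaux(t, n, sumdivaux2(t, n, i + 1))
--     else:
--         o = sumdivaux(t, n, sumdivaux2(t, n, i + 1))
--         out0 = 0
--         p = i
--         for j in range(1, t[i] + 1):
--             out0 += p
--             p *= i
--         return (out0 + 1) * o
-- ===== SOURCE B (Python) =====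
-- def _geom_factor(j, tj):
--     return (tj + 1) if j == 1 else (j ** (tj + 1) - 1) // (j - 1)
--
-- def sumdivaux(t, n, i):
--     result = 1
--     for j in range(i, n + 1):
--         if t[j] > 0:
--             result *= _geom_factor(j, t[j])
--     return result
-- ===== Notes on version B (the rewrite author's own statement) =====
-- stated objective: simpler
-- what changed: Replaces the mutual recursion (zero-skipping scanner sumdivaux2 plus an inner accumulation loop summing powers) by one flat iterative loop over j in [i, n] that multiplies in the closed-form geometric factor (j^(t[j]+1)-1)//(j-1) (t[j]+1 when j==1) for entries with t[j] > 0.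
import Mathlib
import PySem

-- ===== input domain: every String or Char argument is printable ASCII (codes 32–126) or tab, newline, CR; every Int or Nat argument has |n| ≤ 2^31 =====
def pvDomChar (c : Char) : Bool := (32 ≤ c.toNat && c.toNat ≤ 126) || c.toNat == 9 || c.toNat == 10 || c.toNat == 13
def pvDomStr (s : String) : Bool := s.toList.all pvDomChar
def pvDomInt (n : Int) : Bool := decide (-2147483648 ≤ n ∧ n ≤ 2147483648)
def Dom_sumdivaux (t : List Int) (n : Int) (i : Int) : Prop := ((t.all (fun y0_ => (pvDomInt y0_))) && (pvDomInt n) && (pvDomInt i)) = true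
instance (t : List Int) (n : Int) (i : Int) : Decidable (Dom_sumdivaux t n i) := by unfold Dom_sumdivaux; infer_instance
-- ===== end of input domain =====

-- B replaces the mutual recursion + inner power-summing loop by one flat loop over [i, n]
-- multiplying in a closed-form geometric factor (simpler decomposition, same cost class).

-- ===== PORT A =====
-- while i < n and t[i] == 0: i += 1; return i   (t[i] via pyGetD; out-of-range excluded by Pre_)
def sumdivaux2 (t : List Int) (n : Int) (i : Int) : Int :=
  if h : i < n ∧ PySem.List.pyGetD t i 0 = 0 then sumdivaux2 t n (i + 1) else i
termination_by (n - i).toNat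
decreasing_by omega

-- termination helper for sumdivaux's recursion (cited in its decreasing_by)
theorem sumdivaux2_ge (t : List Int) (n : Int) (i : Int) : i ≤ sumdivaux2 t n i := by
  unfold sumdivaux2
  split
  next h =>
    have := sumdivaux2_ge t n (i + 1)
    omega
  next => omega
termination_by (n - i).toNat
decreasing_by omega

def sumdivaux (t : List Int) (n : Int) (i : Int) : Int :=
  if hgt : i > n then 1
  else if PySem.List.pyGetD t i 0 = 0 then
    sumdivaux t n (sumdivaux2 t n (i + 1))
  else
    let o := sumdivaux t n (sumdivaux2 t n (i + 1))
    -- out0 = 0; p = i; for j in range(1, t[i] + 1): out0 += p; p *= i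
    let s := (PySem.List.pyRange 1 (PySem.List.pyGetD t i 0 + 1) 1).foldl
      (fun (s : Int × Int) _ => (s.1 + s.2, s.2 * i)) (0, i)
    (s.1 + 1) * o
termination_by (n + 1 - i).toNat
decreasing_by
  all_goals have := sumdivaux2_ge t n (i + 1); omega

-- ===== PORT B =====
-- (tj + 1) if j == 1 else (j ** (tj + 1) - 1) // (j - 1)
def geomFactor (j : Int) (tj : Int) : Int :=
  if j = 1 then tj + 1 else PySem.Int.floordiv (j ^ (tj + 1).toNat - 1) (j - 1)

def sumdivaux_alt (t : List Int) (n : Int) (i : Int) : Int :=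
  (PySem.List.pyRange i (n + 1) 1).foldl
    (fun result j =>
      if PySem.List.pyGetD t j 0 > 0 then result * geomFactor j (PySem.List.pyGetD t j 0)
      else result) 1

-- ===== PRECONDITION & SPEC =====
-- Pre_ excludes exactly the inputs on which Python A raises IndexError: when i ≤ n both
-- programs read t[j] for every j in [i, n], so all these must be valid Python indices.
def Pre_sumdivaux (t : List Int) (n : Int) (i : Int) : Prop :=
  i > n ∨ (-(t.length : Int) ≤ i ∧ n < (t.length : Int))
instance (t : List Int) (n : Int) (i : Int) : Decidable (Pre_sumdivaux t n i) := by
  unfold Pre_sumdivaux; infer_instance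
def pvWitness_sumdivaux : List Int × Int × Int := ([1, 0, 2], 2, 0)

def Spec_sumdivaux (t : List Int) (n : Int) (i : Int) (out : Int) : Prop := out = sumdivaux_alt t n i
instance (t : List Int) (n : Int) (i : Int) (out : Int) : Decidable (Spec_sumdivaux t n i out) := by unfold Spec_sumdivaux; infer_instance

-- ===== CLAIM (what is proved, stated in full; the proofs are below) =====
def Claim_equal_sumdivaux : Prop := ∀ (t : List Int) (n : Int) (i : Int), Dom_sumdivaux t n i → Pre_sumdivaux t n i → Spec_sumdivaux t n i (sumdivaux t n i)

-- ===== LEMMAS AND PROOFS =====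

theorem alt_nil (t : List Int) (n : Int) (i : Int) (h : i > n) :
    sumdivaux_alt t n i = 1 := by
  unfold sumdivaux_alt
  rw [PySem.List.pyRange_one_eq_nil (by omega)]
  rfl

theorem foldl_hom_mul (f : Int → Int → Int) (hf : ∀ r j, f r j = r * f 1 j)
    (l : List Int) (r : Int) : l.foldl f r = r * l.foldl f 1 := by
  induction l generalizing r with
  | nil => simp
  | cons a l ih =>
    simp only [List.foldl_cons]
    rw [ih (f r a), ih (f 1 a), hf]
    ring

theorem alt_cons (t : List Int) (n : Int) (i : Int) (h : i ≤ n) :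
    sumdivaux_alt t n i
      = (if PySem.List.pyGetD t i 0 > 0 then geomFactor i (PySem.List.pyGetD t i 0) else 1)
        * sumdivaux_alt t n (i + 1) := by
  unfold sumdivaux_alt
  rw [PySem.List.pyRange_one_cons (by omega : i < n + 1)]
  simp only [List.foldl_cons]
  rw [foldl_hom_mul _ (by intro r j; split_ifs <;> ring)]
  split_ifs <;> ring

theorem alt_skip (t : List Int) (n : Int) (k : Int) :
    sumdivaux_alt t n (sumdivaux2 t n k) = sumdivaux_alt t n k := by
  rw [sumdivaux2]
  split
  next h =>
    rw [alt_skip t n (k + 1), alt_cons t n k (by omega)]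
    simp [h.2]
  next => rfl
termination_by (n - k).toNat
decreasing_by omega

theorem inner_fold (i : Int) (l : List Int) (a p : Int) :
    l.foldl (fun (s : Int × Int) _ => (s.1 + s.2, s.2 * i)) (a, p)
      = (a + p * ∑ k ∈ Finset.range l.length, i ^ k, p * i ^ l.length) := by
  induction l generalizing a p with
  | nil => simp
  | cons b l ih =>
    simp only [List.foldl_cons, ih, List.length_cons]
    rw [Prod.mk.injEq]
    refine ⟨?_, ?_⟩
    · rw [geom_sum_succ]
      ring
    · ring

-- A's inner accumulation loop equals B's closed-form factor (positive exponent)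
theorem factor_eq (i : Int) (tj : Int) (h : 0 < tj) :
    ((PySem.List.pyRange 1 (tj + 1) 1).foldl
      (fun (s : Int × Int) _ => (s.1 + s.2, s.2 * i)) (0, i)).1 + 1
    = geomFactor i tj := by
  have hlen : (PySem.List.pyRange 1 (tj + 1) 1).length = tj.toNat := by
    rw [PySem.List.length_pyRange_one]
    omega
  have hexp : (tj + 1).toNat = tj.toNat + 1 := by omega
  rw [inner_fold, hlen]
  unfold geomFactor
  rw [hexp]
  have hsum := geom_sum_succ (x := i) (n := tj.toNat)
  by_cases h1 : i = 1
  · subst h1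
    simp
    omega
  · rw [if_neg h1]
    have hne : i - 1 ≠ 0 := by omega
    have hpow : i ^ (tj.toNat + 1) - 1
        = (i - 1) * ∑ k ∈ Finset.range (tj.toNat + 1), i ^ k := by
      rw [← geom_sum_mul i (tj.toNat + 1)]
      ring
    rw [hpow]
    have hfd : PySem.Int.floordiv ((i - 1) * ∑ k ∈ Finset.range (tj.toNat + 1), i ^ k) (i - 1)
        = ∑ k ∈ Finset.range (tj.toNat + 1), i ^ k :=
      Int.mul_fdiv_cancel_left _ hne
    rw [hfd, hsum]
    ring

theorem sumdivaux_main (t : List Int) (n : Int) (i : Int) :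
    sumdivaux t n i = sumdivaux_alt t n i := by
  rw [sumdivaux]
  split
  next hgt => exact (alt_nil t n i hgt).symm
  next hle =>
    have hrec : sumdivaux t n (sumdivaux2 t n (i + 1))
        = sumdivaux_alt t n (sumdivaux2 t n (i + 1)) :=
      sumdivaux_main t n (sumdivaux2 t n (i + 1))
    have hskip := alt_skip t n (i + 1)
    rw [alt_cons t n i (by omega)]
    split
    next hz =>
      rw [hrec, hskip]
      simp [hz]
    next hnz =>
      rw [hrec, hskip]
      dsimp only
      by_cases hpos : PySem.List.pyGetD t i 0 > 0
      · rw [if_pos hpos, factor_eq i (PySem.List.pyGetD t i 0) hpos]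
      · rw [if_neg hpos]
        rw [PySem.List.pyRange_one_eq_nil (by omega)]
        simp
termination_by (n + 1 - i).toNat
decreasing_by have := sumdivaux2_ge t n (i + 1); omega

-- ===== VERDICT (by name: the statement is the Claim_ definition above) =====
theorem sumdivaux_spec : Claim_equal_sumdivaux := by
  intro t n i _ _
  unfold Spec_sumdivaux
  exact sumdivaux_main t n i
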